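-- pv_equiv track=rewrite | github.com/codesrepo/aimo3-training-pipeline | preprocess_training_samples_multi.py | select_block_indices
-- ===== SOURCE A (Python) =====
-- from typing import Any, Dict, List, Optional, Set, Tuple
--
-- def select_block_indices(n_blocks: int, first_k: int, last_l: int) -> List[int]:
--     """Union of first K and last L block indices, sorted, deduped."""
--     if n_blocks <= 0:
--         return []
--     first = list(range(0, min(first_k, n_blocks)))
--     lo = max(0, n_blocks - last_l)
--     last = list(range(lo, n_blocks))
--     seen: Set[int] = set()
--     out: List[int] = []
--     for idx in first + last:
--         if idx not in seen:
--             seen.add(idx)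
--             out.append(idx)
--     return sorted(out)
-- ===== SOURCE B (Python) =====
-- def select_block_indices(n_blocks, first_k, last_l):
--     """Union of first K and last L block indices, sorted, deduped (closed-form)."""
--     if n_blocks <= 0:
--         return []
--     a = min(first_k, n_blocks)
--     lo = max(0, n_blocks - last_l)
--     if a >= lo:
--         return list(range(0, n_blocks))
--     return list(range(0, max(0, a))) + list(range(lo, n_blocks))
-- ===== Notes on version B (the rewrite author's own statement) =====
-- stated objective: simpler
-- what changed: Replaces the set-based dedup loop and final sort with a closed-form case split: if the clamped prefix end reaches the suffix start return range(0, n_blocks), otherwise concatenate the two disjoint ascending ranges directly; no set, dedup pass or sort.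
import Mathlib
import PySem

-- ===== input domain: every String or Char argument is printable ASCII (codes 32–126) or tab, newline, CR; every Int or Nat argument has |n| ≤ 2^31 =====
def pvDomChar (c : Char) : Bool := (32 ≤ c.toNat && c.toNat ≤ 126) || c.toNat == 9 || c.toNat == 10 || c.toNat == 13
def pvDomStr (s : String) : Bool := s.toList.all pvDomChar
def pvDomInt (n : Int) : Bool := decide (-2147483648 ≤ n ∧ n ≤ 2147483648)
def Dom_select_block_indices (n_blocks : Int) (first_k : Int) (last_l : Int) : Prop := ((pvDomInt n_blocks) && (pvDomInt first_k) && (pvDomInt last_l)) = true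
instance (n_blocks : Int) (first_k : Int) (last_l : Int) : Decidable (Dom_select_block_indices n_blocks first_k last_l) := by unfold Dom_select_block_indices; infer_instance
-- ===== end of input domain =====

-- B replaces A's set/dedup-loop/sort pipeline with a closed-form case split on two ranges (simpler).

-- ===== PORT A =====
def select_block_indices (n_blocks : Int) (first_k : Int) (last_l : Int) : List Int :=
  if n_blocks ≤ 0 then []
  else
    let first := PySem.List.pyRange 0 (min first_k n_blocks) 1
    let lo := max 0 (n_blocks - last_l)
    let last := PySem.List.pyRange lo n_blocks 1
    let st := (first ++ last).foldl
      (fun (st : PySem.Set Int × List Int) idx =>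
        if PySem.Set.contains st.1 idx then st
        else (PySem.Set.add st.1 idx, st.2 ++ [idx]))
      (PySem.Set.empty, [])
    PySem.List.sorted st.2 (fun x => x) false

-- ===== PORT B =====
def select_block_indices_alt (n_blocks : Int) (first_k : Int) (last_l : Int) : List Int :=
  if n_blocks ≤ 0 then []
  else
    let a := min first_k n_blocks
    let lo := max 0 (n_blocks - last_l)
    if a ≥ lo then PySem.List.pyRange 0 n_blocks 1
    else PySem.List.pyRange 0 (max 0 a) 1 ++ PySem.List.pyRange lo n_blocks 1

-- ===== PRECONDITION & SPEC =====
def Spec_select_block_indices (n_blocks : Int) (first_k : Int) (last_l : Int) (out : List Int) : Prop := out = select_block_indices_alt n_blocks first_k last_l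
instance (n_blocks : Int) (first_k : Int) (last_l : Int) (out : List Int) : Decidable (Spec_select_block_indices n_blocks first_k last_l out) := by unfold Spec_select_block_indices; infer_instance

-- ===== CLAIM (what is proved, stated in full; the proofs are below) =====
def Claim_equal_select_block_indices : Prop := ∀ (n_blocks : Int) (first_k : Int) (last_l : Int), Dom_select_block_indices n_blocks first_k last_l → Spec_select_block_indices n_blocks first_k last_l (select_block_indices n_blocks first_k last_l)

-- ===== LEMMAS AND PROOFS =====

-- A's seen-set and out-list stay equal throughout the loop, so the loop is Set.add folded.
theorem pv_loop_eq (xs : List Int) (s : PySem.Set Int) :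
    xs.foldl
      (fun (st : PySem.Set Int × List Int) idx =>
        if PySem.Set.contains st.1 idx then st
        else (PySem.Set.add st.1 idx, st.2 ++ [idx]))
      (s, s) = (xs.foldl PySem.Set.add s, xs.foldl PySem.Set.add s) := by
  induction xs generalizing s with
  | nil => rfl
  | cons x xs ih =>
    simp only [List.foldl_cons]
    by_cases h : x ∈ s
    · rw [if_pos (by simp [h]), PySem.Set.add_of_mem h, ih]
    · rw [if_neg (by simp [h]), PySem.Set.add_of_not_mem h, ih]

theorem pv_out_eq (xs : List Int) :
    (xs.foldl
      (fun (st : PySem.Set Int × List Int) idx =>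
        if PySem.Set.contains st.1 idx then st
        else (PySem.Set.add st.1 idx, st.2 ++ [idx]))
      (PySem.Set.empty, [])).2 = PySem.Set.ofList xs := by
  have := pv_loop_eq xs PySem.Set.empty
  rw [PySem.Set.ofList_eq_foldl]
  exact congrArg Prod.snd this

theorem select_block_indices_spec : Claim_equal_select_block_indices := by
  intro n k l _
  unfold Spec_select_block_indices select_block_indices select_block_indices_alt
  by_cases hn : n ≤ 0
  · simp [hn]
  · simp only [if_neg hn]
    rw [pv_out_eq]
    set a := min k n with ha
    set lo := max 0 (n - l) with hlo
    have hn' : 0 < n := lt_of_not_ge hn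
    have han : a ≤ n := min_le_right _ _
    have hlo0 : 0 ≤ lo := le_max_left _ _
    by_cases hcase : a ≥ lo
    · rw [if_pos hcase]
      apply PySem.List.sorted_id_eq_of_perm_of_pairwise
      · rw [List.perm_ext_iff_of_nodup (PySem.List.nodup_pyRange_one _ _) (PySem.Set.nodup_ofList _)]
        intro x
        simp only [PySem.Set.mem_ofList, List.mem_append, PySem.List.mem_pyRange_one]
        constructor
        · rintro ⟨hx0, hxn⟩
          by_cases hxa : x < a
          · exact Or.inl ⟨hx0, hxa⟩
          · exact Or.inr ⟨le_trans hcase (le_of_not_gt hxa), hxn⟩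
        · rintro (⟨hx0, hxa⟩ | ⟨hxlo, hxn⟩)
          · exact ⟨hx0, lt_of_lt_of_le hxa han⟩
          · exact ⟨le_trans hlo0 hxlo, hxn⟩
      · exact (PySem.List.pairwise_lt_pyRange_one 0 n).imp le_of_lt
    · rw [if_neg hcase]
      have halo : a < lo := lt_of_not_ge hcase
      have hmaxlo : max 0 a ≤ lo := max_le hlo0 (le_of_lt halo)
      apply PySem.List.sorted_id_eq_of_perm_of_pairwise
      · rw [List.perm_ext_iff_of_nodup ?_ (PySem.Set.nodup_ofList _)]
        · intro x
          simp only [PySem.Set.mem_ofList, List.mem_append, PySem.List.mem_pyRange_one]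
          constructor
          · rintro (⟨hx0, hxa⟩ | h)
            · exact Or.inl ⟨hx0, by omega⟩
            · exact Or.inr h
          · rintro (⟨hx0, hxa⟩ | h)
            · exact Or.inl ⟨hx0, by omega⟩
            · exact Or.inr h
        · rw [List.nodup_append]
          refine ⟨PySem.List.nodup_pyRange_one _ _, PySem.List.nodup_pyRange_one _ _, ?_⟩
          intro x hx y hy
          rw [PySem.List.mem_pyRange_one] at hx hy
          omega
      · rw [List.pairwise_append]
        refine ⟨(PySem.List.pairwise_lt_pyRange_one 0 (max 0 a)).imp le_of_lt,
                (PySem.List.pairwise_lt_pyRange_one lo n).imp le_of_lt, ?_⟩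
        intro x hx y hy
        rw [PySem.List.mem_pyRange_one] at hx hy
        omega
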